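-- pv_equiv track=rewrite | github.com/basileia/Advent_of_code_2020 | 09/advent09b.py | invalid_number_in_row
-- ===== SOURCE A (Python) =====
-- def invalid_number_in_row(data, preamble):
--     count = 0
--     for i in range(preamble, len(data)):
--         target = data[i]
--         valid = False
--         for j in range(count, i):
--             if data[j] < target:
--                 pair = target - data[j]
--                 if pair in data[count:i]:
--                     if pair != data[j]:
--                         valid = True
--         count += 1
--         if valid is False:
--             return target
-- ===== SOURCE B (Python) =====
-- def invalid_number_in_row(data, preamble):
--     # Sort each window and run a two-pointer two-sum scan instead of the
--     # quadratic rescan: for sorted w, move lo/hi inward by comparing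
--     # w[lo]+w[hi] with the target; at the first exact sum the answer is
--     # decided (w[lo] != w[hi] and w[lo] < t), since equal endpoints mean the
--     # whole range is one repeated value and w[lo] >= t bounds every pair's
--     # minimum from below.
--     for i in range(preamble, len(data)):
--         t = data[i]
--         w = sorted(data[i - preamble:i])
--         lo, hi = 0, len(w) - 1
--         found = False
--         while lo < hi:
--             s = w[lo] + w[hi]
--             if s < t:
--                 lo += 1
--             elif s > t:
--                 hi -= 1
--             else:
--                 found = w[lo] != w[hi] and w[lo] < t
--                 break
--         if not found:
--             return t
--     return None
-- ===== Notes on version B (the rewrite author's own statement) =====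
-- stated objective: faster
-- what changed: Replaces A's per-element quadratic rescan (inner index loop with an O(preamble) list-slice membership test per candidate) by sorting each window and deciding two-sum with a single two-pointer sweep.
-- outside the precondition, e.g. on invalid_number_in_row([1, 2, 3, 4], -2): A returns 3, B returns 4
import Mathlib
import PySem

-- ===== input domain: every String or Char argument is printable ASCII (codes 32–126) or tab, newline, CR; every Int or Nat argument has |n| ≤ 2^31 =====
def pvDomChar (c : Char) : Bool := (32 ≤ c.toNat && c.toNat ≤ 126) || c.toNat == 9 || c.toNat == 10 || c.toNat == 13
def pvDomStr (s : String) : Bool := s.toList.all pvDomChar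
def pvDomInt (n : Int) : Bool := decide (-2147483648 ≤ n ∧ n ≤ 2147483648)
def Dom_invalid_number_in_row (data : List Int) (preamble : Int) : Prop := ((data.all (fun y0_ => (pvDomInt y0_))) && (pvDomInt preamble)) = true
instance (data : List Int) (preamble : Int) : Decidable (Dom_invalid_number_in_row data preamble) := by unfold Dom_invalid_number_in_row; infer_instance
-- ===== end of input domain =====

-- B replaces A's quadratic per-window rescan by sorting each window and running a
-- two-pointer two-sum scan; the return value is proved equal on Pre_ (0 ≤ preamble).

-- ===== PORT A =====
-- Inner j-loop body of A; list indexing is in range under Pre_ (0 ≤ preamble), so pyGetD with default 0 is exact there.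
def pvAstep (data : List Int) (target count i : Int) (valid : Bool) (j : Int) : Bool :=
  let dj := PySem.List.pyGetD data j 0
  if dj < target then
    let pair := target - dj
    if pair ∈ PySem.List.slice data (some count) (some i) then
      if pair ≠ dj then true else valid
    else valid
  else valid

def pvAvalid (data : List Int) (target : Int) (count i : Int) : Bool :=
  (PySem.List.pyRange count i 1).foldl (pvAstep data target count i) false

def pvAloop (data : List Int) : List Int → Int → Option Int
  | [], _ => none
  | i :: rest, count =>
    let target := PySem.List.pyGetD data i 0
    let valid := pvAvalid data target count i
    if valid = false then some target else pvAloop data rest (count + 1)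

def invalid_number_in_row (data : List Int) (preamble : Int) : Option Int :=
  pvAloop data (PySem.List.pyRange preamble (data.length : Int) 1) 0

-- ===== PORT B =====
-- The while-loop of Source B: two pointers lo/hi over the sorted window w; at the first
-- exact sum the answer is decided (found = w[lo] != w[hi] and w[lo] < t) and the loop breaks.
def pvTp (w : List Int) (t : Int) (lo hi : Int) : Bool :=
  if h : lo < hi then
    let a := PySem.List.pyGetD w lo 0
    let b := PySem.List.pyGetD w hi 0
    if a + b < t then pvTp w t (lo + 1) hi
    else if t < a + b then pvTp w t lo (hi - 1)
    else decide (a ≠ b) && decide (a < t)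
  else false
termination_by (hi - lo).toNat
decreasing_by all_goals omega

def pvBloop (dat : List Int) (preamble : Int) : List Int → Option Int
  | [] => none
  | i :: rest =>
    let t := PySem.List.pyGetD dat i 0
    let w := PySem.List.sorted (PySem.List.slice dat (some (i - preamble)) (some i)) (fun x => x) false
    if pvTp w t 0 ((w.length : Int) - 1) then pvBloop dat preamble rest else some t

def invalid_number_in_row_alt (data : List Int) (preamble : Int) : Option Int :=
  pvBloop data preamble (PySem.List.pyRange preamble (data.length : Int) 1)

-- ===== PRECONDITION & SPEC =====
-- Pre_ restricts to the natural domain of a window size: it excludes negative preamble, where A's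
-- negative-index wraparound reads a window that is an accident of Python indexing (or A raises IndexError).
def Pre_invalid_number_in_row (data : List Int) (preamble : Int) : Prop := 0 ≤ preamble
instance (data : List Int) (preamble : Int) : Decidable (Pre_invalid_number_in_row data preamble) := by unfold Pre_invalid_number_in_row; infer_instance
def pvWitness_invalid_number_in_row : List Int × Int := ([35, 20, 15, 25, 47], 2)

def Spec_invalid_number_in_row (data : List Int) (preamble : Int) (out : Option Int) : Prop := out = invalid_number_in_row_alt data preamble
instance (data : List Int) (preamble : Int) (out : Option Int) : Decidable (Spec_invalid_number_in_row data preamble out) := by unfold Spec_invalid_number_in_row; infer_instance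

-- ===== CLAIM (what is proved, stated in full; the proofs are below) =====
def Claim_equal_invalid_number_in_row : Prop := ∀ (data : List Int) (preamble : Int), Dom_invalid_number_in_row data preamble → Pre_invalid_number_in_row data preamble → Spec_invalid_number_in_row data preamble (invalid_number_in_row data preamble)

-- ===== LEMMAS AND PROOFS =====

-- A's validity condition for one window, phrased over the window list.
def pvValid (w : List Int) (t : Int) : Bool :=
  w.any (fun x => decide (x < t) && decide ((t - x) ∈ w) && decide (t - x ≠ x))

-- "a valid pair exists between positions lo and hi of s"
def pvP (s : List Int) (t : Int) (lo hi : Int) : Prop :=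
  ∃ p q : Nat, lo ≤ (p : Int) ∧ p < q ∧ (q : Int) ≤ hi ∧ q < s.length ∧
    s.getD p 0 + s.getD q 0 = t ∧ s.getD p 0 ≠ s.getD q 0 ∧ s.getD p 0 < t

theorem pv_mono (s : List Int) (hs : s.Pairwise (· ≤ ·)) (p q : Nat)
    (hpq : p ≤ q) (hq : q < s.length) : s.getD p 0 ≤ s.getD q 0 := by
  rcases Nat.eq_or_lt_of_le hpq with h | h
  · subst h; rfl
  · have := (List.pairwise_iff_getElem.mp hs) p q (by omega) hq h
    simpa [List.getD_eq_getElem?_getD, List.getElem?_eq_getElem, hq, show p < s.length by omega] using this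

theorem pv_tp_iff (s : List Int) (t : Int) (hs : s.Pairwise (· ≤ ·)) :
    ∀ (n : Nat) (lo hi : Int), (hi - lo).toNat = n → 0 ≤ lo → hi < (s.length : Int) →
      (pvTp s t lo hi = true ↔ pvP s t lo hi) := by
  intro n
  induction n with
  | zero =>
    intro lo hi hn h0 hl
    have hle : hi ≤ lo := by omega
    rw [pvTp, dif_neg (by omega)]
    simp only [Bool.false_eq_true, false_iff]
    rintro ⟨p, q, h1, h2, h3, -, -⟩
    omega
  | succ m ih =>
    intro lo hi hn h0 hl
    have hlt : lo < hi := by omega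
    have hloN : lo = ((lo.toNat : Nat) : Int) := by omega
    have hhiN : hi = ((hi.toNat : Nat) : Int) := by omega
    have hqlen : hi.toNat < s.length := by omega
    have ha : PySem.List.pyGetD s lo 0 = s.getD lo.toNat 0 := by
      rw [hloN]; exact PySem.List.pyGetD_natCast s lo.toNat 0
    have hb : PySem.List.pyGetD s hi 0 = s.getD hi.toNat 0 := by
      rw [hhiN]; exact PySem.List.pyGetD_natCast s hi.toNat 0
    set a := s.getD lo.toNat 0 with hadef
    set b := s.getD hi.toNat 0 with hbdef
    rw [pvTp, dif_pos hlt]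
    simp only [ha, hb]
    by_cases h1 : a + b < t
    · rw [if_pos h1, ih (lo + 1) hi (by omega) (by omega) hl]
      constructor
      · rintro ⟨p, q, hp, hpq, hq, hql, hsum, hne, hlt'⟩
        exact ⟨p, q, by omega, hpq, hq, hql, hsum, hne, hlt'⟩
      · rintro ⟨p, q, hp, hpq, hq, hql, hsum, hne, hlt'⟩
        rcases Int.lt_or_le lo (p : Int) with h | h
        · exact ⟨p, q, by omega, hpq, hq, hql, hsum, hne, hlt'⟩
        · -- p = lo: sum too small, contradiction
          have hple : lo.toNat ≤ p := by omega
          have hpeq : p = lo.toNat := by omega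
          have h2 : s.getD q 0 ≤ b := pv_mono s hs q hi.toNat (by omega) hqlen
          have h3 : s.getD p 0 = a := by rw [hpeq]
          omega
    · rw [if_neg h1]
      by_cases h2 : t < a + b
      · rw [if_pos h2, ih lo (hi - 1) (by omega) h0 (by omega)]
        constructor
        · rintro ⟨p, q, hp, hpq, hq, hql, hsum, hne, hlt'⟩
          exact ⟨p, q, hp, hpq, by omega, hql, hsum, hne, hlt'⟩
        · rintro ⟨p, q, hp, hpq, hq, hql, hsum, hne, hlt'⟩
          rcases Int.lt_or_le (q : Int) hi with h | h
          · exact ⟨p, q, hp, hpq, by omega, hql, hsum, hne, hlt'⟩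
          · have hqeq : q = hi.toNat := by omega
            have h3 : a ≤ s.getD p 0 := pv_mono s hs lo.toNat p (by omega) (by omega)
            have h4 : s.getD q 0 = b := by rw [hqeq]
            omega
      · have hsum : a + b = t := by omega
        rw [if_neg h2]
        constructor
        · intro hr
          simp only [Bool.and_eq_true, decide_eq_true_eq] at hr
          exact ⟨lo.toNat, hi.toNat, by omega, by omega, by omega, hqlen, by omega, hr.1, hr.2⟩
        · rintro ⟨p, q, hp, hpq, hq, hql, hsum', hne, hlt'⟩
          have hap : a ≤ s.getD p 0 := pv_mono s hs lo.toNat p (by omega) (by omega)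
          have hqb : s.getD q 0 ≤ b := pv_mono s hs q hi.toNat (by omega) hqlen
          have halt : a < t := by omega
          have hab : a ≠ b := by
            intro hab
            have h5 : s.getD p 0 ≤ s.getD q 0 := pv_mono s hs p q (by omega) hql
            omega
          simp [hab, halt]

theorem pv_valid_eq_tp (w : List Int) (t : Int) :
    pvValid w t = pvTp (PySem.List.sorted w (fun x => x) false) t 0 ((w.length : Int) - 1) := by
  set s := PySem.List.sorted w (fun x => x) false with hsdef
  have hperm : s.Perm w := PySem.List.sorted_perm w (fun x => x) false
  have hlen : s.length = w.length := hperm.length_eq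
  have hs : s.Pairwise (· ≤ ·) := by
    have := PySem.List.sorted_pairwise (κ := Int) w (fun x => x)
    simpa using this
  have hmem : ∀ x : Int, x ∈ s ↔ x ∈ w := fun x => hperm.mem_iff
  have hiff := pv_tp_iff s t hs ((w.length : Int) - 1 - 0).toNat 0 ((w.length : Int) - 1)
    rfl le_rfl (by omega)
  rw [Bool.eq_iff_iff, hiff]
  unfold pvValid
  simp only [List.any_eq_true, Bool.and_eq_true, decide_eq_true_eq]
  constructor
  · rintro ⟨x, hxw, ⟨hxt, hyw⟩, hne⟩
    set y := t - x with hy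
    have hxs : x ∈ s := (hmem x).mpr hxw
    have hys : y ∈ s := (hmem y).mpr hyw
    obtain ⟨ix, hix, hix2⟩ := List.mem_iff_getElem.mp hxs
    obtain ⟨iy, hiy, hiy2⟩ := List.mem_iff_getElem.mp hys
    have hgx : s.getD ix 0 = x := by rw [List.getD_eq_getElem s 0 hix]; exact hix2
    have hgy : s.getD iy 0 = y := by rw [List.getD_eq_getElem s 0 hiy]; exact hiy2
    have hine : ix ≠ iy := by
      intro h; rw [h] at hgx; exact hne (hgy.symm.trans hgx)
    -- orient so the smaller index comes first
    rcases Nat.lt_or_ge ix iy with h | h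
    · refine ⟨ix, iy, by omega, h, by omega, by omega, ?_, ?_, ?_⟩
      · rw [hgx, hgy]; omega
      · rw [hgx, hgy]; intro hh; exact hne (hh.symm)
      · rw [hgx]; exact hxt
    · have h' : iy < ix := by omega
      have hle : s.getD iy 0 ≤ s.getD ix 0 := pv_mono s hs iy ix (by omega) hix
      refine ⟨iy, ix, by omega, h', by omega, by omega, ?_, ?_, ?_⟩
      · rw [hgx, hgy]; omega
      · rw [hgx, hgy]; exact hne
      · rw [hgx] at hle; omega
  · rintro ⟨p, q, -, hpq, -, hql, hsum, hne, hlt'⟩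
    have hpl : p < s.length := by omega
    refine ⟨s.getD p 0, (hmem _).mp ?_, ⟨hlt', ?_⟩, ?_⟩
    · simp [List.getD_eq_getElem?_getD, hpl]
    · have hqs : s.getD q 0 ∈ s := by
        simp [List.getD_eq_getElem?_getD, List.getElem?_eq_getElem, hql]
      rw [show t - s.getD p 0 = s.getD q 0 by omega]
      exact (hmem _).mp hqs
    · omega

theorem pv_window_snoc (data : List Int) (a p : Nat) (h : a + p < data.length) :
    (data.drop a).take (p + 1) = (data.drop a).take p ++ [data.getD (a + p) 0] := by
  rw [List.take_add_one]
  congr 1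
  rw [List.getElem?_drop, List.getElem?_eq_getElem (by omega)]
  simp [List.getD_eq_getElem?_getD, List.getElem?_eq_getElem h]

theorem pv_avalid_eq (data : List Int) (t : Int) (c i : Int)
    (h0 : 0 ≤ c) (h1 : c ≤ i) (h2 : i ≤ (data.length : Int)) :
    pvAvalid data t c i = pvValid (PySem.List.slice data (some c) (some i)) t := by
  set w := PySem.List.slice data (some c) (some i) with hw
  have hwdt : w = (data.drop c.toNat).take (i.toNat - c.toNat) := by
    rw [hw, PySem.List.slice_toNat data h0 (le_trans h0 h1)]
  have hq : ∀ (acc : Bool) (jn : Nat), pvAstep data t c i acc (jn : Int)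
      = if (decide (data.getD jn 0 < t) && decide ((t - data.getD jn 0) ∈ w) &&
            decide (t - data.getD jn 0 ≠ data.getD jn 0)) then true else acc := by
    intro acc jn
    simp only [pvAstep, PySem.List.pyGetD_natCast, ← hw]
    set x := data.getD jn 0 with hx
    by_cases hx1 : x < t <;> by_cases hx2 : (t - x) ∈ w <;> by_cases hx3 : t - x ≠ x <;>
      simp [hx1, hx2, hx3]
  have main : ∀ (n : Nat) (acc : Bool), c.toNat + n ≤ data.length →
      List.foldl (pvAstep data t c i) acc ((List.range n).map (fun (k : Nat) => c + (k : Int)))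
      = (acc || ((data.drop c.toNat).take n).any
          (fun x => decide (x < t) && decide ((t - x) ∈ w) && decide (t - x ≠ x))) := by
    intro n
    induction n with
    | zero => intro acc h; simp
    | succ m ihm =>
      intro acc h
      rw [List.range_succ, List.map_append, List.foldl_append, ihm acc (by omega)]
      rw [pv_window_snoc data c.toNat m (by omega)]
      simp only [List.map_cons, List.map_nil, List.foldl_cons, List.foldl_nil,
        List.any_append, List.any_cons, List.any_nil]
      rw [show c + ((m : Nat) : Int) = ((c.toNat + m : Nat) : Int) by omega, hq]
      set x := data.getD (c.toNat + m) 0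
      by_cases hx : (decide (x < t) && decide ((t - x) ∈ w) && decide (t - x ≠ x)) = true <;>
        simp [Bool.or_comm, Bool.or_left_comm]
  unfold pvAvalid
  rw [PySem.List.pyRange_one, main (i - c).toNat false (by omega)]
  rw [hwdt, show (i - c).toNat = i.toNat - c.toNat by omega]
  simp [pvValid]

theorem pv_loop_eq (data : List Int) (preamble : Int) (hp : 0 ≤ preamble) :
    ∀ (n : Nat) (i : Int), preamble ≤ i → i ≤ (data.length : Int) →
      ((data.length : Int) - i).toNat = n →
    pvAloop data (PySem.List.pyRange i (data.length : Int) 1) (i - preamble)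
      = pvBloop data preamble (PySem.List.pyRange i (data.length : Int) 1) := by
  intro n
  induction n with
  | zero =>
    intro i hpi hil hn
    rw [PySem.List.pyRange_one_eq_nil (by omega)]
    simp [pvAloop, pvBloop]
  | succ m ih =>
    intro i hpi hil hn
    have hlt : i < (data.length : Int) := by omega
    rw [PySem.List.pyRange_one_cons hlt]
    have hA := pv_avalid_eq data (PySem.List.pyGetD data i 0) (i - preamble) i
      (by omega) (by omega) hil
    have hlenw : ((PySem.List.sorted (PySem.List.slice data (some (i - preamble)) (some i))
        (fun x => x) false).length : Int)
        = ((PySem.List.slice data (some (i - preamble)) (some i)).length : Int) := by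
      rw [(PySem.List.sorted_perm _ _ _).length_eq]
    have hB := pv_valid_eq_tp (PySem.List.slice data (some (i - preamble)) (some i))
      (PySem.List.pyGetD data i 0)
    simp only [pvAloop, pvBloop, hlenw]
    rw [hA, hB]
    by_cases hv : pvTp (PySem.List.sorted (PySem.List.slice data (some (i - preamble)) (some i))
        (fun x => x) false) (PySem.List.pyGetD data i 0) 0
        (((PySem.List.slice data (some (i - preamble)) (some i)).length : Int) - 1) = true
    · rw [hv]
      rw [if_neg (by simp), if_pos rfl]
      have := ih (i + 1) (by omega) (by omega) (by omega)
      rw [show i - preamble + 1 = i + 1 - preamble by ring]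
      exact this
    · rw [Bool.not_eq_true] at hv
      rw [hv, if_pos rfl, if_neg (by simp)]

-- ===== VERDICT (by name: the statement is the Claim_ definition above) =====
theorem invalid_number_in_row_spec : Claim_equal_invalid_number_in_row := by
  intro data preamble hdom hpre
  unfold Spec_invalid_number_in_row invalid_number_in_row invalid_number_in_row_alt
  have hp : (0 : Int) ≤ preamble := hpre
  by_cases hlen : preamble ≤ (data.length : Int)
  · have h := pv_loop_eq data preamble hp ((data.length : Int) - preamble).toNat preamble
      le_rfl hlen rfl
    rw [show preamble - preamble = (0 : Int) by ring] at h
    exact h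
  · rw [PySem.List.pyRange_one_eq_nil (by omega)]
    simp [pvAloop, pvBloop]
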